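-- pv_equiv track=rewrite | github.com/Manticoree/lidco | src/lidco/verify/logic.py | check_circular
-- ===== SOURCE A (Python) =====
-- def check_circular(statements: list[str]) -> list[str]:
--     """Return list of circular-reference issues.
--
--     A circular reference is detected when a later statement is
--     textually contained in an earlier one *and* vice-versa, or when
--     the same statement appears more than once.
--     """
--     issues: list[str] = []
--     seen: dict[str, int] = {}
--     for idx, stmt in enumerate(statements):
--         normalised = stmt.strip().lower()
--         if normalised in seen:
--             issues.append(
--                 f"Circular: statement {idx} duplicates statement {seen[normalised]}"
--             )
--         else:
--             seen[normalised] = idx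
--     return issues
-- ===== SOURCE B (Python) =====
-- def check_circular(statements: list[str]) -> list[str]:
--     """Return list of circular-reference issues (duplicate normalised statements)."""
--     seen: dict[str, int] = {}
--     for idx, stmt in enumerate(statements):
--         seen.setdefault(stmt.strip().lower(), idx)
--     return [
--         f"Circular: statement {idx} duplicates statement {first}"
--         for idx, stmt in enumerate(statements)
--         if (first := seen[stmt.strip().lower()]) != idx
--     ]
-- ===== Notes on version B (the rewrite author's own statement) =====
-- stated objective: alternative
-- what changed: Replaces A's single pass with an interleaved append-accumulator and conditional dict insertion by a two-phase decomposition: first a setdefault pass builds the first-occurrence index table, then a list comprehension emits an issue for every position whose first occurrence differs.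
import Mathlib
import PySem

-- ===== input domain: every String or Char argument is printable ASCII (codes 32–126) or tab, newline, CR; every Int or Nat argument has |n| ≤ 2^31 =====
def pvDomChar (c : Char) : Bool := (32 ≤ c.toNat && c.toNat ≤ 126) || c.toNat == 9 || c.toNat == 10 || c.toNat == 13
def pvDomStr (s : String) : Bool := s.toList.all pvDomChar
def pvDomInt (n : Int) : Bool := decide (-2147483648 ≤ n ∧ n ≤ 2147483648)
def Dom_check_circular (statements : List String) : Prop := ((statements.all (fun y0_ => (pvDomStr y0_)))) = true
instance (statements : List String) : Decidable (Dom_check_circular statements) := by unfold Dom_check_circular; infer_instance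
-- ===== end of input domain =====

-- B changes the decomposition: a first-occurrence index table built once (setdefault), then a
-- comprehension emits the issues; A interleaves the dict updates with an append accumulator.

-- shared by both ports: normalisation and the issue message (the same f-string in Source A and Source B)
def pvNorm (s : String) : String := PySem.Str.lower (PySem.Str.strip s)

def pvMsg (idx first : Int) : String :=
  "Circular: statement " ++ PySem.Int.toStr idx ++ " duplicates statement " ++ PySem.Int.toStr first

-- ===== PORT A =====
-- the 'for idx, stmt in enumerate(statements)' loop of A, carrying (issues, seen)
def checkCircularLoopA : List (Int × String) → List String → PySem.Dict String Int → List String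
  | [], issues, _ => issues
  | (idx, stmt) :: rest, issues, seen =>
    let normalised := pvNorm stmt
    match seen.get? normalised with
    | some first => checkCircularLoopA rest (issues ++ [pvMsg idx first]) seen
    | none => checkCircularLoopA rest issues (seen.insert normalised idx)

def check_circular (statements : List String) : List String :=
  checkCircularLoopA (PySem.List.enumerate statements 0) [] PySem.Dict.empty

-- ===== PORT B =====
-- first pass of Source B: seen.setdefault(stmt.strip().lower(), idx)
def firstSeenB : List (Int × String) → PySem.Dict String Int → PySem.Dict String Int
  | [], seen => seen
  | (idx, stmt) :: rest, seen => firstSeenB rest (seen.setdefault (pvNorm stmt) idx)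

-- the list comprehension of Source B (seen[…] never misses: every key was inserted by the first pass)
def emitB (seen : PySem.Dict String Int) : List (Int × String) → List String
  | [] => []
  | (idx, stmt) :: rest =>
    match seen.get? (pvNorm stmt) with
    | some first => if first ≠ idx then pvMsg idx first :: emitB seen rest else emitB seen rest
    | none => emitB seen rest

def check_circular_alt (statements : List String) : List String :=
  let seen := firstSeenB (PySem.List.enumerate statements 0) PySem.Dict.empty
  emitB seen (PySem.List.enumerate statements 0)

-- ===== PRECONDITION & SPEC =====
def Spec_check_circular (statements : List String) (out : List String) : Prop := out = check_circular_alt statements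
instance (statements : List String) (out : List String) : Decidable (Spec_check_circular statements out) := by unfold Spec_check_circular; infer_instance

-- ===== CLAIM (what is proved, stated in full; the proofs are below) =====
def Claim_equal_check_circular : Prop := ∀ (statements : List String), Dom_check_circular statements → Spec_check_circular statements (check_circular statements)

-- ===== LEMMAS AND PROOFS =====

-- existing entries survive B's setdefault pass
theorem firstSeenB_preserve (L : List (Int × String)) (d : PySem.Dict String Int)
    (k : String) (v : Int) (h : d.get? k = some v) : (firstSeenB L d).get? k = some v := by
  induction L generalizing d with
  | nil => simpa [firstSeenB] using h
  | cons p rest ih =>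
    obtain ⟨idx, stmt⟩ := p
    simp only [firstSeenB]
    apply ih
    by_cases hk : k = pvNorm stmt
    · subst hk
      rw [PySem.Dict.get?_setdefault_self, h]; rfl
    · rw [PySem.Dict.get?_setdefault_of_ne _ _ hk, h]

-- the main invariant: A's interleaved loop equals B's table-then-emit, for any start state whose
-- stored indices never collide with the indices still to come
theorem loop_eq (L : List (Int × String)) (issues : List String) (seen : PySem.Dict String Int)
    (hfresh : ∀ p ∈ L, ∀ v, seen.get? (pvNorm p.2) = some v → v ≠ p.1)
    (hpw : L.Pairwise (fun p q => p.1 ≠ q.1)) :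
    checkCircularLoopA L issues seen = issues ++ emitB (firstSeenB L seen) L := by
  induction L generalizing issues seen with
  | nil => simp [checkCircularLoopA, emitB]
  | cons p rest ih =>
    obtain ⟨idx, stmt⟩ := p
    have hpw' := (List.pairwise_cons.mp hpw)
    cases hget : seen.get? (pvNorm stmt) with
    | some first =>
      have hcont : seen.contains (pvNorm stmt) = true := by
        rw [PySem.Dict.contains_eq_isSome_get?, hget]; rfl
      have hS : firstSeenB ((idx, stmt) :: rest) seen = firstSeenB rest seen := by
        simp [firstSeenB, PySem.Dict.setdefault_of_contains _ _ hcont]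
      have hSget : (firstSeenB rest seen).get? (pvNorm stmt) = some first :=
        firstSeenB_preserve rest seen _ _ hget
      have hne : first ≠ idx := hfresh (idx, stmt) (by simp) first hget
      rw [hS]
      simp only [checkCircularLoopA, hget, emitB, hSget, if_pos hne]
      rw [ih (issues ++ [pvMsg idx first]) seen
        (fun q hq v hv => hfresh q (List.mem_cons_of_mem _ hq) v hv) hpw'.2]
      simp
    | none =>
      have hcont : seen.contains (pvNorm stmt) = false := by
        rw [PySem.Dict.contains_eq_isSome_get?, hget]; rfl
      have hS : firstSeenB ((idx, stmt) :: rest) seen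
          = firstSeenB rest (seen.insert (pvNorm stmt) idx) := by
        simp [firstSeenB, PySem.Dict.setdefault_of_not_contains _ _ hcont]
      have hSget : (firstSeenB rest (seen.insert (pvNorm stmt) idx)).get? (pvNorm stmt) = some idx :=
        firstSeenB_preserve rest _ _ _ (PySem.Dict.get?_insert_self _ _ _)
      rw [hS]
      simp only [checkCircularLoopA, hget, emitB, hSget, ne_eq]
      rw [if_neg (by simp)]
      apply ih issues (seen.insert (pvNorm stmt) idx) ?_ hpw'.2
      intro q hq v hv
      by_cases hk : pvNorm q.2 = pvNorm stmt
      · rw [hk, PySem.Dict.get?_insert_self] at hv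
        cases hv
        exact hpw'.1 q hq
      · rw [PySem.Dict.get?_insert_of_ne _ _ hk] at hv
        exact hfresh q (List.mem_cons_of_mem _ hq) v hv

-- ===== VERDICT (by name: the statement is the Claim_ definition above) =====
theorem check_circular_spec : Claim_equal_check_circular := by
  intro statements _
  unfold Spec_check_circular check_circular check_circular_alt
  apply loop_eq
  · intro p _ v hv
    rw [PySem.Dict.get?_empty] at hv
    exact absurd hv (by simp)
  · exact (PySem.List.pairwise_lt_enumerate statements 0).imp (fun h => ne_of_lt h)
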